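-- pv_equiv track=rewrite | github.com/jarvis-1805/DSAwithPYTHON | Recursions/Recursions 3/Return_subsets_sum_to_K.py | findSubsetsThatSumToKHelper
-- ===== SOURCE A (Python) =====
-- def findSubsetsThatSumToKHelper(arr, k, idx, output):
--
--     if(idx == len(arr)) :
--         if k == 0 :
--             return [[]]
--         else:
--             return output
--
--     temp1 = findSubsetsThatSumToKHelper(arr, k, idx + 1, output)
--
--     temp2 = findSubsetsThatSumToKHelper(arr, k - arr[idx], idx + 1, output)
--
--     output = []
--
--     for i in range(len(temp2)):
--         output.append([arr[idx]])
--         for j in range(len(temp2[i])):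
--             output[i].append(temp2[i][j])
--
--     for i in temp1:
--         output.append(i)
--
--     return output
-- ===== SOURCE B (Python) =====
-- def findSubsetsThatSumToKHelper(arr, k, idx, output):
--     memo = {}
--
--     def f(i, r):
--         if i == len(arr):
--             return [[]] if r == 0 else output
--         if (i, r) not in memo:
--             with_i = [[arr[i]] + s for s in f(i + 1, r - arr[i])]
--             memo[(i, r)] = with_i + f(i + 1, r)
--         return memo[(i, r)]
--
--     return f(idx, k)
-- ===== Notes on version B (the rewrite author's own statement) =====
-- stated objective: alternative
-- what changed: Replaced A's naive recursion that rebuilds and merges result lists with nested index loops by a memoized top-down DP over (index, remaining) states built with list comprehensions, so repeated states are computed once.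
import Mathlib
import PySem

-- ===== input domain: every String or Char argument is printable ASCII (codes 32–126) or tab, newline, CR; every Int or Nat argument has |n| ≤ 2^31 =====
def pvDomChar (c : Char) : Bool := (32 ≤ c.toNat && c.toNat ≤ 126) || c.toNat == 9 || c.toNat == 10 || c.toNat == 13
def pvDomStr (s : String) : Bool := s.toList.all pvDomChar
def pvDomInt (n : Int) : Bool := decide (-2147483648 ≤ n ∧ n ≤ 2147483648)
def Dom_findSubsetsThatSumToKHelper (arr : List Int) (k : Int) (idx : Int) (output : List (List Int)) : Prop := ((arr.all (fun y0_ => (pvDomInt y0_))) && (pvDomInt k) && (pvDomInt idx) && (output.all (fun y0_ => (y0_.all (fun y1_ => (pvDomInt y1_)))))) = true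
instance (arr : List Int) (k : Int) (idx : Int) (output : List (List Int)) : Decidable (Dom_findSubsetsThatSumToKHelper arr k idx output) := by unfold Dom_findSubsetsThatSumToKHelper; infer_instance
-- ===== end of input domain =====

-- B replaces A's naive recursion (rebuilding result lists with nested index loops)
-- by a memoized top-down DP over (index, remaining) states (objective: alternative).

-- ===== PORT A =====
-- fuel = (arr.length - idx).toNat; under Pre_ fuel reaches 0 exactly when idx = len(arr),
-- so the fuel-0 branch is Python's base case.  arr[idx] via pyGet? (exact, incl. negative wrap).
def pvAgo (arr : List Int) : Nat → Int → Int → List (List Int) → List (List Int)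
  | 0, k, _, output => if k = 0 then [[]] else output
  | n+1, k, idx, output =>
    if idx = (arr.length : Int) then (if k = 0 then [[]] else output)
    else
      let temp1 := pvAgo arr n k (idx + 1) output
      let x := (PySem.List.pyGet? arr idx).getD 0
      let temp2 := pvAgo arr n (k - x) (idx + 1) output
      -- output = []; for i in range(len(temp2)): append [arr[idx]] then append each temp2[i][j]
      let out2 := temp2.foldl (fun acc s => acc ++ [s.foldl (fun t e => t ++ [e]) [x]]) []
      -- for i in temp1: output.append(i)
      temp1.foldl (fun acc i => acc ++ [i]) out2

def findSubsetsThatSumToKHelper (arr : List Int) (k : Int) (idx : Int) (output : List (List Int)) : List (List Int) :=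
  pvAgo arr (arr.length - idx).toNat k idx output

-- ===== PORT B =====
-- f(i, r) with the memo dict threaded through; include branch first, then the exclude call.
-- same fuel convention as A's port: fuel = (len - i).toNat, 0 exactly at the base case.
def pvBgo (arr : List Int) (output : List (List Int)) :
    Nat → Int → Int → PySem.Dict (Int × Int) (List (List Int)) →
    (List (List Int)) × PySem.Dict (Int × Int) (List (List Int))
  | 0, r, _, m => (if r = 0 then [[]] else output, m)
  | n+1, r, i, m =>
    if i = (arr.length : Int) then (if r = 0 then [[]] else output, m)
    else
      match m.get? (i, r) with
      | some v => (v, m)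
      | none =>
        let x := (PySem.List.pyGet? arr i).getD 0
        let p1 := pvBgo arr output n (r - x) (i + 1) m
        let withI := p1.1.map (fun s => x :: s)           -- [[arr[i]] + s for s in f(i+1, r-arr[i])]
        let p2 := pvBgo arr output n r (i + 1) p1.2
        let v := withI ++ p2.1
        (v, p2.2.insert (i, r) v)

def findSubsetsThatSumToKHelper_alt (arr : List Int) (k : Int) (idx : Int) (output : List (List Int)) : List (List Int) :=
  (pvBgo arr output (arr.length - idx).toNat k idx PySem.Dict.empty).1

-- ===== PRECONDITION & SPEC =====
-- Pre_ excludes exactly the inputs where the Python A raises (IndexError for idx < -len(arr),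
-- RecursionError for idx > len(arr)); B raises there too.
def Pre_findSubsetsThatSumToKHelper (arr : List Int) (k : Int) (idx : Int) (output : List (List Int)) : Prop :=
  -(arr.length : Int) ≤ idx ∧ idx ≤ (arr.length : Int)
instance (arr : List Int) (k : Int) (idx : Int) (output : List (List Int)) : Decidable (Pre_findSubsetsThatSumToKHelper arr k idx output) := by unfold Pre_findSubsetsThatSumToKHelper; infer_instance

def pvWitness_findSubsetsThatSumToKHelper : List Int × Int × Int × List (List Int) := ([1, 2, 3], 3, 0, [])

def Spec_findSubsetsThatSumToKHelper (arr : List Int) (k : Int) (idx : Int) (output : List (List Int)) (out : List (List Int)) : Prop := out = findSubsetsThatSumToKHelper_alt arr k idx output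
instance (arr : List Int) (k : Int) (idx : Int) (output : List (List Int)) (out : List (List Int)) : Decidable (Spec_findSubsetsThatSumToKHelper arr k idx output out) := by unfold Spec_findSubsetsThatSumToKHelper; infer_instance

-- ===== CLAIM =====
def Claim_equal_findSubsetsThatSumToKHelper : Prop := ∀ (arr : List Int) (k : Int) (idx : Int) (output : List (List Int)), Dom_findSubsetsThatSumToKHelper arr k idx output → Pre_findSubsetsThatSumToKHelper arr k idx output → Spec_findSubsetsThatSumToKHelper arr k idx output (findSubsetsThatSumToKHelper arr k idx output)

-- ===== LEMMAS AND PROOFS =====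

-- every memo entry stores the (fuel-canonical) value of A's recursion at its state
def pvGood (arr : List Int) (output : List (List Int))
    (m : PySem.Dict (Int × Int) (List (List Int))) : Prop :=
  ∀ (i r : Int) (v : List (List Int)), m.get? (i, r) = some v →
    v = pvAgo arr ((arr.length : Int) - i).toNat r i output

theorem pvAgo_succ_closed (arr : List Int) (output : List (List Int)) (n : Nat) (k idx : Int)
    (h : idx ≠ (arr.length : Int)) :
    pvAgo arr (n+1) k idx output
      = (pvAgo arr n (k - (PySem.List.pyGet? arr idx).getD 0) (idx + 1) output).map
          (fun s => ((PySem.List.pyGet? arr idx).getD 0) :: s)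
        ++ pvAgo arr n k (idx + 1) output := by
  simp only [pvAgo, if_neg h]
  have h1 : ∀ (s : List Int),
      s.foldl (fun t e => t ++ [e]) [((PySem.List.pyGet? arr idx).getD 0)]
        = ((PySem.List.pyGet? arr idx).getD 0) :: s := by
    intro s
    rw [show (fun (t : List Int) e => t ++ [e]) = (fun t e => t ++ [id e]) from rfl,
      PySem.List.foldl_append_singleton_eq_map]
    simp
  rw [PySem.List.foldl_append_singleton_eq_map, PySem.List.foldl_append_singleton_eq_map]
  simp [h1]

theorem pvBgo_correct (arr : List Int) (output : List (List Int)) :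
    ∀ (n : Nat) (r i : Int) (m : PySem.Dict (Int × Int) (List (List Int))),
      pvGood arr output m → ((n : Int) = (arr.length : Int) - i) →
      (pvBgo arr output n r i m).1 = pvAgo arr n r i output ∧
      pvGood arr output (pvBgo arr output n r i m).2 := by
  intro n
  induction n with
  | zero =>
    intro r i m hm _
    exact ⟨rfl, hm⟩
  | succ n ih =>
    intro r i m hm hn
    have hi : i ≠ (arr.length : Int) := by omega
    by_cases hhit : ∃ v, m.get? (i, r) = some v
    · obtain ⟨v, hv⟩ := hhit
      have hval := hm i r v hv
      have hfuel : ((arr.length : Int) - i).toNat = n + 1 := by omega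
      constructor
      · simp only [pvBgo, if_neg hi, hv]
        rw [hval, hfuel]
      · simp only [pvBgo, if_neg hi, hv]
        exact hm
    · have hmiss : m.get? (i, r) = none := by
        cases h : m.get? (i, r) with
        | none => rfl
        | some v => exact absurd ⟨v, h⟩ hhit
      have hn' : (n : Int) = (arr.length : Int) - (i + 1) := by omega
      obtain ⟨h1v, h1g⟩ := ih (r - (PySem.List.pyGet? arr i).getD 0) (i + 1) m hm hn'
      obtain ⟨h2v, h2g⟩ := ih r (i + 1)
        (pvBgo arr output n (r - (PySem.List.pyGet? arr i).getD 0) (i + 1) m).2 h1g hn'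
      have hres : (pvBgo arr output (n+1) r i m).1
          = pvAgo arr (n+1) r i output := by
        simp only [pvBgo, if_neg hi, hmiss]
        rw [h1v, h2v, pvAgo_succ_closed arr output n r i hi]
      refine ⟨hres, ?_⟩
      simp only [pvBgo, if_neg hi, hmiss]
      intro i' r' v' hv'
      rw [PySem.Dict.get?_insert] at hv'
      by_cases hk : (i', r') = (i, r)
      · rw [if_pos hk] at hv'
        have hi2 : i' = i := congrArg Prod.fst hk
        have hr2 : r' = r := congrArg Prod.snd hk
        have hfuel : ((arr.length : Int) - i').toNat = n + 1 := by rw [hi2]; omega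
        have hv2 : v' = (pvBgo arr output (n+1) r i m).1 := by
          simp only [pvBgo, if_neg hi, hmiss]
          exact (Option.some.inj hv').symm
        rw [hv2, hres, hfuel, hi2, hr2]
      · rw [if_neg hk] at hv'
        exact h2g i' r' v' hv'

-- ===== VERDICT =====
theorem findSubsetsThatSumToKHelper_spec : Claim_equal_findSubsetsThatSumToKHelper := by
  intro arr k idx output _ hpre
  unfold Spec_findSubsetsThatSumToKHelper findSubsetsThatSumToKHelper findSubsetsThatSumToKHelper_alt
  obtain ⟨h1, h2⟩ := hpre
  have hgood : pvGood arr output PySem.Dict.empty := by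
    intro i r v hv
    simp [PySem.Dict.get?_empty] at hv
  have hn : (((arr.length - idx).toNat : Nat) : Int) = (arr.length : Int) - idx := by omega
  exact ((pvBgo_correct arr output _ k idx PySem.Dict.empty hgood hn).1).symm
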